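-- pv_equiv track=rewrite | github.com/oyarsa/event_extraction | preprocess/common.py | generate_answer_separate_tags
-- ===== SOURCE A (Python) =====
-- def tag_sort_key(tag: str) -> tuple[int, str]:
--     """Sort tags by the following order: Cause, Relation, Effect.
--     Tags with the same type are sorted alphabetically.
--
--     Args:
--         tag (str): The tag to sort.
--
--     Returns:
--         tuple[int, str]: A pair of tag-based index and the tag itself.
--     """
--     for i, c in enumerate("CRE"):
--         if tag.startswith("[" + c):
--             return i, tag
--     assert False, f"Unknown tag: {tag}"
--
-- def generate_answer_separate_tags(
--     events: dict[str, list[str]], label_map: dict[str, str], relation: str | None = None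
-- ) -> str:
--     out = []
--     for ev_type, evs in events.items():
--         for e in evs:
--             out.append(f"[{label_map[ev_type]}] {e}")
--     if relation:
--         out.append(f"[Relation] {relation}")
--     return " ".join(sorted(out, key=tag_sort_key))
-- ===== SOURCE B (Python) =====
-- def generate_answer_separate_tags(
--     events: dict[str, list[str]], label_map: dict[str, str], relation: str | None = None
-- ) -> str:
--     causes: list[str] = []
--     relations: list[str] = []
--     effects: list[str] = []
--
--     def route(s: str) -> None:
--         t = s[1]
--         if t == "C":
--             causes.append(s)
--         elif t == "R":
--             relations.append(s)
--         elif t == "E":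
--             effects.append(s)
--         else:
--             assert False, f"Unknown tag: {s}"
--
--     for ev_type, evs in events.items():
--         for e in evs:
--             route(f"[{label_map[ev_type]}] {e}")
--     if relation:
--         relations.append(f"[Relation] {relation}")
--     return " ".join(sorted(causes) + sorted(relations) + sorted(effects))
-- ===== Notes on version B (the rewrite author's own statement) =====
-- stated objective: alternative
-- what changed: Instead of one sort of the whole list under a custom (type-index, string) tuple key, B routes each formatted tag into one of three buckets (Cause/Relation/Effect) by its type character in a single pass, sorts each bucket plainly alphabetically, and concatenates the buckets in fixed order.
import Mathlib
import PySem

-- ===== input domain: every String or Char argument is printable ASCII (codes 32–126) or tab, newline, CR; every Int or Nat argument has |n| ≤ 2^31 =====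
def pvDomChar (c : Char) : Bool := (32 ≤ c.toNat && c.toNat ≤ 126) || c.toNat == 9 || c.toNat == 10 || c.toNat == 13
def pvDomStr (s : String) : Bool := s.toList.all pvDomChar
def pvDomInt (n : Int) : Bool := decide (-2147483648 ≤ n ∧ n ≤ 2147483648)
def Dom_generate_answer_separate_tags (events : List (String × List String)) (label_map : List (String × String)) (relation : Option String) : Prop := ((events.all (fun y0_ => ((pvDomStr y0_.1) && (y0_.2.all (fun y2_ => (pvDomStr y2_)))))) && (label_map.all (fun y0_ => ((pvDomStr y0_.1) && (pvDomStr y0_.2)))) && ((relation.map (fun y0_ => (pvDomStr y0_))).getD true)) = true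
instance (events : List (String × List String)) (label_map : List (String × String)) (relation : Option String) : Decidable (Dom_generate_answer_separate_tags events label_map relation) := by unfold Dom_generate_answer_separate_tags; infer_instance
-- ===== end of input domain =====

-- B replaces A's single sort under the (type-index, tag) tuple key by a one-pass partition into
-- Cause/Relation/Effect buckets, each bucket sorted plainly and the buckets concatenated in fixed order
-- (objective: alternative decomposition; both raise on missing labels / labels not starting C|R|E,
-- excluded by Pre_).

-- ===== PORT A =====
-- f"[{label}] {e}"
def pvTag (label e : String) : String := String.ofList ('[' :: (label.toList ++ ']' :: ' ' :: e.toList))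

-- tag_sort_key: the loop over enumerate("CRE"); none = the assert fired (Python raises there)
def tag_sort_key (tag : String) : Option (Int × String) :=
  [((0:Int), 'C'), (1, 'R'), (2, 'E')].findSome? (fun ic =>
    if PySem.Chars.startswith tag.toList ['[', ic.2] then some (ic.1, tag) else none)

-- body of A's events loop: appends one formatted tag per e; label_map[ev_type] = first-match lookup
def pvStepA (label_map : List (String × String)) (acc : List String) (p : String × List String) : List String :=
  p.2.foldl (fun acc e => acc ++ [pvTag (((PySem.Dict.mk label_map).get? p.1).getD "") e]) acc

def generate_answer_separate_tags (events : List (String × List String)) (label_map : List (String × String)) (relation : Option String) : String :=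
  let out : List String := events.foldl (pvStepA label_map) []
  let out : List String :=
    match relation with
    | some r => if r.toList = [] then out else out ++ [pvTag "Relation" r]
    | none => out
  -- sorted(out, key=tag_sort_key): tuple key (index, tag); the getD 3 branch is A's assert (outside Pre_)
  PySem.Str.join " " (PySem.List.sorted2 out (fun t => ((tag_sort_key t).map Prod.fst).getD 3) (fun t => t))

-- ===== PORT B =====
-- route(s): look at s[1] and append to the matching bucket; no bucket = Python's assert (raises there)
def pvRoute (s : String) (acc : List String × List String × List String) : List String × List String × List String :=
  let t := PySem.Str.pyGet? s 1
  if t = some 'C' then (acc.1 ++ [s], acc.2.1, acc.2.2)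
  else if t = some 'R' then (acc.1, acc.2.1 ++ [s], acc.2.2)
  else if t = some 'E' then (acc.1, acc.2.1, acc.2.2 ++ [s])
  else acc

def pvStepB (label_map : List (String × String)) (acc : List String × List String × List String) (p : String × List String) : List String × List String × List String :=
  p.2.foldl (fun acc e => pvRoute (pvTag (((PySem.Dict.mk label_map).get? p.1).getD "") e) acc) acc

def generate_answer_separate_tags_alt (events : List (String × List String)) (label_map : List (String × String)) (relation : Option String) : String :=
  let b := events.foldl (pvStepB label_map) ([], [], [])
  let b :=
    match relation with
    | some r => if r.toList = [] then b else (b.1, b.2.1 ++ [pvTag "Relation" r], b.2.2)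
    | none => b
  PySem.Str.join " "
    (PySem.List.sorted b.1 (fun t => t) ++ PySem.List.sorted b.2.1 (fun t => t) ++ PySem.List.sorted b.2.2 (fun t => t))

-- ===== PRECONDITION & SPEC =====
def pvValidLabel (l : String) : Bool :=
  match l.toList with
  | c :: _ => c == 'C' || c == 'R' || c == 'E'
  | [] => false

-- Pre_: for every event type whose event list is nonempty, label_map has the key (else KeyError) and
-- the label starts with 'C', 'R' or 'E' (else the assert in tag_sort_key / route fires). This is
-- exactly the set of inputs on which the Python A returns normally.
def Pre_generate_answer_separate_tags (events : List (String × List String)) (label_map : List (String × String)) (relation : Option String) : Prop :=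
  events.all (fun p => p.2.isEmpty || (((PySem.Dict.mk label_map).get? p.1).elim false pvValidLabel)) = true
instance (events : List (String × List String)) (label_map : List (String × String)) (relation : Option String) : Decidable (Pre_generate_answer_separate_tags events label_map relation) := by unfold Pre_generate_answer_separate_tags; infer_instance

def pvWitness_generate_answer_separate_tags : (List (String × List String)) × (List (String × String)) × Option String :=
  ([("x", ["e1"]), ("y", ["e2", "e3"])], [("x", "Cause"), ("y", "Effect")], some "why")

def Spec_generate_answer_separate_tags (events : List (String × List String)) (label_map : List (String × String)) (relation : Option String) (out : String) : Prop := out = generate_answer_separate_tags_alt events label_map relation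
instance (events : List (String × List String)) (label_map : List (String × String)) (relation : Option String) (out : String) : Decidable (Spec_generate_answer_separate_tags events label_map relation out) := by unfold Spec_generate_answer_separate_tags; infer_instance

-- ===== CLAIM (what is proved, stated in full; the proofs are below) =====
def Claim_equal_generate_answer_separate_tags : Prop := ∀ (events : List (String × List String)) (label_map : List (String × String)) (relation : Option String), Dom_generate_answer_separate_tags events label_map relation → Pre_generate_answer_separate_tags events label_map relation → Spec_generate_answer_separate_tags events label_map relation (generate_answer_separate_tags events label_map relation)

-- ===== LEMMAS AND PROOFS =====

-- proof-side abbreviations: A's integer key, the combined key as one string, the three bucket predicates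
def pvK1 (t : String) : Int := ((tag_sort_key t).map Prod.fst).getD 3
def pvKey (t : String) : String := String.ofList (Char.ofNat (pvK1 t).toNat :: t.toList)
def pvC (s : String) : Bool := s.toList[1]? == some 'C'
def pvR (s : String) : Bool := s.toList[1]? == some 'R'
def pvE (s : String) : Bool := s.toList[1]? == some 'E'
def pvValid (s : String) : Bool := (s.toList[0]? == some '[') && (pvC s || pvR s || pvE s)

theorem pvK1_cases (t : String) : pvK1 t = 0 ∨ pvK1 t = 1 ∨ pvK1 t = 2 ∨ pvK1 t = 3 := by
  simp only [pvK1, tag_sort_key, List.findSome?]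
  split_ifs <;> simp

-- A's tuple-key comparison coincides with plain string comparison of pvKey
theorem pv_before_eq (a b : String) :
    (decide (pvK1 a < pvK1 b) || (!decide (pvK1 b < pvK1 a) && decide (a < b))) = decide (pvKey a < pvKey b) := by
  rcases pvK1_cases a with ha|ha|ha|ha <;> rcases pvK1_cases b with hb|hb|hb|hb <;>
    simp [pvKey, ha, hb, String.lt_iff_toList_lt, List.cons_lt_cons_iff]

theorem pv_sorted2_eq_sorted (out : List String) :
    PySem.List.sorted2 out (fun t => ((tag_sort_key t).map Prod.fst).getD 3) (fun t => t)
      = PySem.List.sorted out pvKey := by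
  show List.foldl _ [] out = List.foldl _ [] out
  congr 1
  funext acc x
  congr 1
  funext a b
  exact pv_before_eq a b

theorem pv_partition_perm (l : List String) (h : ∀ s ∈ l, (pvC s || pvR s || pvE s) = true) :
    l.Perm (l.filter pvC ++ l.filter pvR ++ l.filter pvE) := by
  induction l with
  | nil => simp
  | cons s l ih =>
    have ih' := ih (fun x hx => h x (List.mem_cons_of_mem _ hx))
    have hs := h s (List.mem_cons_self ..)
    rcases hc : s.toList[1]? with _ | c
    · simp [pvC, pvR, pvE, hc] at hs
    · by_cases h1 : c = 'C'
      · subst h1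
        simp only [List.filter_cons, pvC, pvR, pvE, hc]
        simp only [Option.some.injEq, beq_iff_eq, Char.reduceEq, if_true, if_false]
        exact ih'.cons s
      · by_cases h2 : c = 'R'
        · subst h2
          simp only [List.filter_cons, pvC, pvR, pvE, hc]
          simp only [Option.some.injEq, beq_iff_eq, Char.reduceEq, if_true, if_false]
          exact (ih'.cons s).trans (List.Perm.append List.perm_middle.symm (List.Perm.refl _))
        · have h3 : c = 'E' := by
            simp [pvC, pvR, pvE, hc, h1, h2] at hs; exact hs
          subst h3
          simp only [List.filter_cons, pvC, pvR, pvE, hc]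
          simp only [Option.some.injEq, beq_iff_eq, Char.reduceEq, if_true, if_false]
          exact (ih'.cons s).trans List.perm_middle.symm

theorem pv_pyGet1 (s : String) : PySem.Str.pyGet? s 1 = s.toList[1]? := by
  rw [show (1:Int) = ((1:Nat):Int) from rfl, PySem.Str.pyGet?_eq, PySem.Chars.pyGet?_eq_listPyGet?, PySem.List.pyGet?_natCast]

theorem pv_route_filter (s : String) (l : List String) :
    pvRoute s (l.filter pvC, l.filter pvR, l.filter pvE)
      = ((l ++ [s]).filter pvC, (l ++ [s]).filter pvR, (l ++ [s]).filter pvE) := by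
  simp only [pvRoute, pv_pyGet1, List.filter_append, List.filter_cons, List.filter_nil]
  rcases hc : s.toList[1]? with _ | c
  · simp [pvC, pvR, pvE, hc]
  · by_cases h1 : c = 'C'
    · subst h1; simp [pvC, pvR, pvE, hc]
    · by_cases h2 : c = 'R'
      · subst h2; simp [pvC, pvR, pvE, hc]
      · by_cases h3 : c = 'E'
        · subst h3; simp [pvC, pvR, pvE, hc]
        · simp [pvC, pvR, pvE, hc, h1, h2, h3]

theorem pv_foldB_inner (g : String → String) (evs : List String) (l : List String) :
    evs.foldl (fun acc e => pvRoute (g e) acc) (l.filter pvC, l.filter pvR, l.filter pvE)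
      = ((evs.foldl (fun acc e => acc ++ [g e]) l).filter pvC,
         (evs.foldl (fun acc e => acc ++ [g e]) l).filter pvR,
         (evs.foldl (fun acc e => acc ++ [g e]) l).filter pvE) := by
  induction evs generalizing l with
  | nil => simp
  | cons e evs ih =>
    simp only [List.foldl_cons, pv_route_filter]
    exact ih (l ++ [g e])

theorem pv_foldB_eq_filter (events : List (String × List String)) (label_map : List (String × String)) :
    events.foldl (pvStepB label_map) ([], [], [])
      = ((events.foldl (pvStepA label_map) []).filter pvC,
         (events.foldl (pvStepA label_map) []).filter pvR,
         (events.foldl (pvStepA label_map) []).filter pvE) := by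
  suffices h : ∀ (evts : List (String × List String)) (l : List String),
      evts.foldl (pvStepB label_map) (l.filter pvC, l.filter pvR, l.filter pvE)
        = ((evts.foldl (pvStepA label_map) l).filter pvC,
           (evts.foldl (pvStepA label_map) l).filter pvR,
           (evts.foldl (pvStepA label_map) l).filter pvE) by
    simpa using h events []
  intro evts
  induction evts with
  | nil => intro l; rfl
  | cons p ps ih =>
    intro l
    simp only [List.foldl_cons, pvStepB, pvStepA, pv_foldB_inner]
    exact ih _

theorem pv_outA_flatMap (events : List (String × List String)) (label_map : List (String × String)) (acc : List String) :
    events.foldl (pvStepA label_map) acc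
      = acc ++ events.flatMap (fun p => p.2.map (fun e => pvTag (((PySem.Dict.mk label_map).get? p.1).getD "") e)) := by
  induction events generalizing acc with
  | nil => simp
  | cons p ps ih =>
    simp only [List.foldl_cons, List.flatMap_cons]
    rw [ih, pvStepA, PySem.List.foldl_append_eq_flatMap]
    rw [List.append_assoc]
    congr 1
    congr 1
    induction p.2 with
    | nil => rfl
    | cons a t iht => simp [List.flatMap_cons, iht]

theorem pv_out_valid (events : List (String × List String)) (label_map : List (String × String))
    (hpre : events.all (fun p => p.2.isEmpty || (((PySem.Dict.mk label_map).get? p.1).elim false pvValidLabel)) = true) :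
    ∀ s ∈ events.foldl (pvStepA label_map) [], pvValid s = true := by
  intro s hs
  rw [pv_outA_flatMap] at hs
  simp only [List.nil_append, List.mem_flatMap, List.mem_map] at hs
  obtain ⟨p, hp, e, he, rfl⟩ := hs
  have hall := (List.all_eq_true.mp hpre) p hp
  have hne : p.2.isEmpty = false := by
    cases h2 : p.2 with
    | nil => rw [h2] at he; cases he
    | cons a t => simp
  rw [hne, Bool.false_or] at hall
  rcases hget : (PySem.Dict.mk label_map).get? p.1 with _ | lbl
  · rw [hget] at hall; cases hall
  · rw [hget] at hall
    simp only [Option.elim] at hall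
    simp only [Option.getD_some]
    unfold pvValidLabel at hall
    rcases hl : lbl.toList with _ | ⟨c, rest⟩
    · rw [hl] at hall; cases hall
    · rw [hl] at hall
      simp only [pvValid, pvC, pvR, pvE, pvTag, String.toList_ofList, hl]
      simpa using hall

theorem pv_shape (s : String) (c : Char) (h0 : s.toList[0]? = some '[') (h1 : s.toList[1]? = some c) :
    ∃ rest, s.toList = '[' :: c :: rest := by
  rcases hl : s.toList with _ | ⟨a, _ | ⟨b, rest⟩⟩ <;> rw [hl] at h0 h1 <;> simp_all

theorem pvK1_of_C (s : String) (hv : pvValid s = true) (hc : pvC s = true) : pvK1 s = 0 := by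
  simp only [pvValid, pvC, Bool.and_eq_true, beq_iff_eq] at hv hc
  obtain ⟨rest, hl⟩ := pv_shape s 'C' hv.1 hc
  simp [pvK1, tag_sort_key, PySem.Chars.startswith, hl, List.isPrefixOf]

theorem pvK1_of_R (s : String) (hv : pvValid s = true) (hc : pvR s = true) : pvK1 s = 1 := by
  simp only [pvValid, pvR, Bool.and_eq_true, beq_iff_eq] at hv hc
  obtain ⟨rest, hl⟩ := pv_shape s 'R' hv.1 hc
  simp [pvK1, tag_sort_key, PySem.Chars.startswith, hl, List.isPrefixOf]

theorem pvK1_of_E (s : String) (hv : pvValid s = true) (hc : pvE s = true) : pvK1 s = 2 := by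
  simp only [pvValid, pvE, Bool.and_eq_true, beq_iff_eq] at hv hc
  obtain ⟨rest, hl⟩ := pv_shape s 'E' hv.1 hc
  simp [pvK1, tag_sort_key, PySem.Chars.startswith, hl, List.isPrefixOf]

theorem pvKey_le_of_eq (a b : String) (h : pvK1 a = pvK1 b) (hab : a ≤ b) : pvKey a ≤ pvKey b := by
  rcases hab.lt_or_eq with hlt | rfl
  · apply le_of_lt
    simp only [pvKey, String.lt_iff_toList_lt, String.toList_ofList, h]
    rw [List.cons_lt_cons_iff]
    exact Or.inr ⟨rfl, String.lt_iff_toList_lt.mp hlt⟩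
  · exact le_refl _

theorem pvKey_lt_of_lt (a b : String) (h : pvK1 a < pvK1 b) : pvKey a < pvKey b := by
  simp only [pvKey, String.lt_iff_toList_lt, String.toList_ofList]
  rw [List.cons_lt_cons_iff]
  left
  rcases pvK1_cases a with ha|ha|ha|ha <;> rcases pvK1_cases b with hb|hb|hb|hb <;>
    rw [ha, hb] at h ⊢ <;> first | (exfalso; omega) | decide

theorem pvKey_inj (a b : String) (h : pvKey a = pvKey b) : a = b := by
  simp only [pvKey, String.ofList_inj, List.cons.injEq] at h
  exact String.toList_inj.mp h.2

theorem pv_sorted_eq_concat (out : List String) (hv : ∀ s ∈ out, pvValid s = true) :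
    PySem.List.sorted out pvKey
      = PySem.List.sorted (out.filter pvC) (fun t => t)
        ++ PySem.List.sorted (out.filter pvR) (fun t => t)
        ++ PySem.List.sorted (out.filter pvE) (fun t => t) := by
  have hvC : ∀ x ∈ PySem.List.sorted (out.filter pvC) (fun t => t), pvK1 x = 0 := by
    intro x hx
    rw [PySem.List.mem_sorted, List.mem_filter] at hx
    exact pvK1_of_C x (hv x hx.1) hx.2
  have hvR : ∀ x ∈ PySem.List.sorted (out.filter pvR) (fun t => t), pvK1 x = 1 := by
    intro x hx
    rw [PySem.List.mem_sorted, List.mem_filter] at hx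
    exact pvK1_of_R x (hv x hx.1) hx.2
  have hvE : ∀ x ∈ PySem.List.sorted (out.filter pvE) (fun t => t), pvK1 x = 2 := by
    intro x hx
    rw [PySem.List.mem_sorted, List.mem_filter] at hx
    exact pvK1_of_E x (hv x hx.1) hx.2
  apply List.eq_of_perm_of_sorted (le := fun a b => pvKey a ≤ pvKey b)
  · intro a b _ _ h1 h2
    exact pvKey_inj a b (le_antisymm h1 h2)
  · exact PySem.List.sorted_pairwise out pvKey
  · rw [List.pairwise_append, List.pairwise_append]
    refine ⟨⟨(PySem.List.sorted_pairwise _ _).imp_of_mem ?_,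
      (PySem.List.sorted_pairwise _ _).imp_of_mem ?_, ?_⟩,
      (PySem.List.sorted_pairwise _ _).imp_of_mem ?_, ?_⟩
    · intro a b ha hb hab
      exact pvKey_le_of_eq a b (by rw [hvC a ha, hvC b hb]) hab
    · intro a b ha hb hab
      exact pvKey_le_of_eq a b (by rw [hvR a ha, hvR b hb]) hab
    · intro a ha b hb
      exact le_of_lt (pvKey_lt_of_lt a b (by rw [hvC a ha, hvR b hb]; omega))
    · intro a b ha hb hab
      exact pvKey_le_of_eq a b (by rw [hvE a ha, hvE b hb]) hab
    · intro a ha b hb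
      rcases List.mem_append.mp ha with ha | ha
      · exact le_of_lt (pvKey_lt_of_lt a b (by rw [hvC a ha, hvE b hb]; omega))
      · exact le_of_lt (pvKey_lt_of_lt a b (by rw [hvR a ha, hvE b hb]; omega))
  · refine (PySem.List.sorted_perm out pvKey false).trans ?_
    refine (pv_partition_perm out (fun s hs => ?_)).trans ?_
    · have := hv s hs
      simp only [pvValid, Bool.and_eq_true] at this
      exact this.2
    · exact (((PySem.List.sorted_perm (out.filter pvC) (fun t : String => t) false).symm.append
        (PySem.List.sorted_perm (out.filter pvR) (fun t : String => t) false).symm).append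
        (PySem.List.sorted_perm (out.filter pvE) (fun t : String => t) false).symm)

theorem pv_relTag_C (r : String) : pvC (pvTag "Relation" r) = false := by
  simp [pvC, pvTag]

theorem pv_relTag_R (r : String) : pvR (pvTag "Relation" r) = true := by
  simp [pvR, pvTag]

theorem pv_relTag_E (r : String) : pvE (pvTag "Relation" r) = false := by
  simp [pvE, pvTag]

theorem pv_relTag_valid (r : String) : pvValid (pvTag "Relation" r) = true := by
  simp only [pvValid, Bool.and_eq_true, Bool.or_eq_true]
  exact ⟨by simp [pvTag], Or.inl (Or.inr (pv_relTag_R r))⟩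

-- the main argument, for an arbitrary final out list and its bucket triple
theorem pv_main (out : List String) (hv : ∀ s ∈ out, pvValid s = true) :
    PySem.Str.join " " (PySem.List.sorted2 out (fun t => ((tag_sort_key t).map Prod.fst).getD 3) (fun t => t))
      = PySem.Str.join " "
          (PySem.List.sorted (out.filter pvC) (fun t => t)
            ++ PySem.List.sorted (out.filter pvR) (fun t => t)
            ++ PySem.List.sorted (out.filter pvE) (fun t => t)) := by
  rw [pv_sorted2_eq_sorted, pv_sorted_eq_concat out hv]

-- ===== VERDICT (by name: the statement is the Claim_ definition above) =====
theorem generate_answer_separate_tags_spec : Claim_equal_generate_answer_separate_tags := by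
  intro events label_map relation _hdom hpre
  unfold Pre_generate_answer_separate_tags at hpre
  unfold Spec_generate_answer_separate_tags
  unfold generate_answer_separate_tags generate_answer_separate_tags_alt
  simp only [pv_foldB_eq_filter]
  have hv := pv_out_valid events label_map hpre
  cases relation with
  | none => exact pv_main _ hv
  | some r =>
    by_cases hr : r.toList = []
    · simp only [hr, if_pos rfl, if_true]
      exact pv_main _ hv
    · simp only [if_neg hr]
      have hv' : ∀ s ∈ events.foldl (pvStepA label_map) [] ++ [pvTag "Relation" r], pvValid s = true := by
        intro s hs
        rcases List.mem_append.mp hs with hs | hs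
        · exact hv s hs
        · rcases List.mem_singleton.mp hs with rfl
          exact pv_relTag_valid r
      rw [pv_main _ hv']
      rw [List.filter_append, List.filter_append, List.filter_append]
      simp [List.filter_cons, pv_relTag_C, pv_relTag_R, pv_relTag_E]
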